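-- pv_equiv track=rewrite | github.com/uiandwe/TIL | algorithm/Dynamic programming/knapsack_0_1.py | solution
-- ===== SOURCE A (Python) =====
-- def solution(n):
--     size = [3, 4, 5]
--     value = [6, 3, 5]
--
--     d = [[0 for i in range(n+2)] for j in range(len(size)+1)]
--
--     for i in range(len(size)):
--         for j in range(n+1):
--             if size[i] <= j:
--                 d[i][j] = d[i-1][j]
--                 d[i][j] = max(value[i] + d[i-1][j-size[i]], d[i][j])
--
--     return d[len(size)-1][n]
-- ===== SOURCE B (Python) =====
-- def solution(n):
--     items = [(3, 6), (4, 3), (5, 5)]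
--     best = 0
--     for mask in range(1 << len(items)):
--         size = 0
--         value = 0
--         for i, (s, v) in enumerate(items):
--             if mask >> i & 1:
--                 size += s
--                 value += v
--         if size <= n:
--             best = max(best, value)
--     return best
-- ===== Notes on version B (the rewrite author's own statement) =====
-- stated objective: faster
-- what changed: Replaced the O(n)-row dynamic-programming table (4 rows of n+2 cells) with a direct enumeration of the 8 subsets of the 3 fixed items, taking the best value whose total size fits; O(1) time and space.
-- intended difference: For n in {3,4,8} A returns 0, 0 and 9 because its DP forgets to inherit d[i-1][j] when item i does not fit (the else branch leaves 0); B returns the correct knapsack maxima 6, 6 and 11, which is the intended value. — e.g. on solution(3): A returns 0, B returns 6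
-- outside the precondition, e.g. on solution(-2): A raises IndexError, B returns 0
import Mathlib
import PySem

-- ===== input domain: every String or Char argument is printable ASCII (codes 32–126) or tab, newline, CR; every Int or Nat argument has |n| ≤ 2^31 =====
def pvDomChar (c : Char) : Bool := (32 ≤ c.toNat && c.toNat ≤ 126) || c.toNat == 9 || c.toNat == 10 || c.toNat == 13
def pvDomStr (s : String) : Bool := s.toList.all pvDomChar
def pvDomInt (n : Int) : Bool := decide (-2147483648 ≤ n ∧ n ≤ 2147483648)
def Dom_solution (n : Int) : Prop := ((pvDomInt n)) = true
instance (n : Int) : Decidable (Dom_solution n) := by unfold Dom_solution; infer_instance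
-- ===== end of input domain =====

set_option maxHeartbeats 1600000

-- B replaces A's O(n) DP table with an enumeration of the 8 item subsets (objective: faster);
-- B returns the intended knapsack value on n ∈ {3,4,8} where A's DP is wrong (see D_solution).

-- ===== PORT A =====
-- Rows are Arrays so that d[i][j] = x is an O(1) in-place write as in Python; every write
-- index is nonnegative and in range on Pre_, so setIfInBounds / toNat are exact there.
def pvGetRow (d : List (Array Int)) (i : Int) : Array Int := (PySem.List.pyGet? d i).getD #[]
-- exact Python read for in-range j (negative j counts from the end); IndexError is outside Pre_
def pvGet (xs : Array Int) (j : Int) : Int := (xs[(if j < 0 then j + xs.size else j).toNat]?).getD 0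
def pvGetL (xs : List Int) (i : Int) : Int := (PySem.List.pyGet? xs i).getD 0
def pvSet (d : List (Array Int)) (i j : Int) (x : Int) : List (Array Int) :=
  let row := pvGetRow d i
  let d := d.set i.toNat #[]  -- drop the matrix's reference so the row write is in place (value unchanged: collapsed by List.set_set)
  d.set i.toNat (row.setIfInBounds j.toNat x)

-- the body of A's inner loop, verbatim (the two assignments to d[i][j])
def bodyA (size value : List Int) (i : Int) (d : List (Array Int)) (j : Int) : List (Array Int) :=
  if pvGetL size i ≤ j then
    let d := pvSet d i j (pvGet (pvGetRow d (i - 1)) j)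
    pvSet d i j (max (pvGetL value i + pvGet (pvGetRow d (i - 1)) (j - pvGetL size i))
                     (pvGet (pvGetRow d i) j))
  else d

def solution (n : Int) : Int :=
  let size : List Int := [3, 4, 5]
  let value : List Int := [6, 3, 5]
  let d : List (Array Int) :=
    (PySem.List.pyRange 0 ((size.length : Int) + 1) 1).map
      (fun _ => ((PySem.List.pyRange 0 (n + 2) 1).map (fun _ => (0 : Int))).toArray)
  let d := (PySem.List.pyRange 0 (size.length : Int) 1).foldl (fun d i =>
    (PySem.List.pyRange 0 (n + 1) 1).foldl (bodyA size value i) d) d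
  pvGet (pvGetRow d ((size.length : Int) - 1)) n

-- ===== PORT B =====
-- `mask >> i & 1` truthiness ported as Nat.testBit (mask comes from range(8), so mask ≥ 0: exact)
def solution_alt (n : Int) : Int :=
  let items : List (Int × Int) := [(3, 6), (4, 3), (5, 5)]
  (PySem.List.pyRange 0 ((1 <<< items.length : Nat) : Int) 1).foldl (fun best mask =>
    let sv := (PySem.List.enumerate items).foldl
      (fun (p : Int × Int) (iv : Int × (Int × Int)) =>
        if mask.toNat.testBit iv.1.toNat then (p.1 + iv.2.1, p.2 + iv.2.2) else p) (0, 0)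
    if sv.1 ≤ n then max best sv.2 else best) 0

-- ===== PRECONDITION & SPEC =====
-- Pre_ excludes exactly n ≤ -2, where A raises IndexError (d[2][n] on a too-short row).
def Pre_solution (n : Int) : Prop := -1 ≤ n
instance (n : Int) : Decidable (Pre_solution n) := by unfold Pre_solution; infer_instance
def pvWitness_solution : Int := 5

-- For n ∈ {3,4,8} A returns 0, 0, 9: its DP never inherits d[i-1][j] when item i does not
-- fit (the else branch leaves 0); B returns the intended knapsack maxima 6, 6, 11.
def D_solution (n : Int) : Prop := n = 3 ∨ n = 4 ∨ n = 8
instance (n : Int) : Decidable (D_solution n) := by unfold D_solution; infer_instance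
def Spec_solution (n : Int) (out : Int) : Prop := ¬ D_solution n → out = solution_alt n
instance (n : Int) (out : Int) : Decidable (Spec_solution n out) := by unfold Spec_solution; infer_instance
def pvDiffWitness_solution : Int := 3
def pvDiffWitnessOut_solution : Int × Int := (0, 6)

-- ===== CLAIM (what is proved, stated in full; the proofs are below) =====
def Claim_unchanged_solution : Prop := ∀ (n : Int), Dom_solution n → Pre_solution n → Spec_solution n (solution n)
def Claim_changed_solution : Prop := Dom_solution (pvDiffWitness_solution) ∧ Pre_solution (pvDiffWitness_solution) ∧ D_solution (pvDiffWitness_solution) ∧ solution (pvDiffWitness_solution) = pvDiffWitnessOut_solution.1 ∧ solution_alt (pvDiffWitness_solution) = pvDiffWitnessOut_solution.2 ∧ pvDiffWitnessOut_solution.1 ≠ pvDiffWitnessOut_solution.2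
def Claim_exact_solution : Prop := ∀ (n : Int), Dom_solution n → Pre_solution n → D_solution n → solution n ≠ solution_alt n

-- ===== LEMMAS AND PROOFS =====

-- closed form of B
def gAlt (n : Int) : Int :=
  if 12 ≤ n then 14 else if 8 ≤ n then 11 else if 7 ≤ n then 9 else if 3 ≤ n then 6 else 0

theorem alt_closed (n : Int) : solution_alt n = gAlt n := by
  have h8 : PySem.List.pyRange 0 (((1 <<< 3 : Nat) : Nat) : Int) 1 = [0,1,2,3,4,5,6,7] := by decide
  have E0 : (PySem.List.enumerate [((3:Int),(6:Int)),(4,3),(5,5)]).foldl (fun (p : Int × Int) (iv : Int × (Int × Int)) => if ((0:Int)).toNat.testBit iv.1.toNat then (p.1 + iv.2.1, p.2 + iv.2.2) else p) ((0:Int), (0:Int)) = (0,0) := by decide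
  have E1 : (PySem.List.enumerate [((3:Int),(6:Int)),(4,3),(5,5)]).foldl (fun (p : Int × Int) (iv : Int × (Int × Int)) => if ((1:Int)).toNat.testBit iv.1.toNat then (p.1 + iv.2.1, p.2 + iv.2.2) else p) ((0:Int), (0:Int)) = (3,6) := by decide
  have E2 : (PySem.List.enumerate [((3:Int),(6:Int)),(4,3),(5,5)]).foldl (fun (p : Int × Int) (iv : Int × (Int × Int)) => if ((2:Int)).toNat.testBit iv.1.toNat then (p.1 + iv.2.1, p.2 + iv.2.2) else p) ((0:Int), (0:Int)) = (4,3) := by decide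
  have E3 : (PySem.List.enumerate [((3:Int),(6:Int)),(4,3),(5,5)]).foldl (fun (p : Int × Int) (iv : Int × (Int × Int)) => if ((3:Int)).toNat.testBit iv.1.toNat then (p.1 + iv.2.1, p.2 + iv.2.2) else p) ((0:Int), (0:Int)) = (7,9) := by decide
  have E4 : (PySem.List.enumerate [((3:Int),(6:Int)),(4,3),(5,5)]).foldl (fun (p : Int × Int) (iv : Int × (Int × Int)) => if ((4:Int)).toNat.testBit iv.1.toNat then (p.1 + iv.2.1, p.2 + iv.2.2) else p) ((0:Int), (0:Int)) = (5,5) := by decide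
  have E5 : (PySem.List.enumerate [((3:Int),(6:Int)),(4,3),(5,5)]).foldl (fun (p : Int × Int) (iv : Int × (Int × Int)) => if ((5:Int)).toNat.testBit iv.1.toNat then (p.1 + iv.2.1, p.2 + iv.2.2) else p) ((0:Int), (0:Int)) = (8,11) := by decide
  have E6 : (PySem.List.enumerate [((3:Int),(6:Int)),(4,3),(5,5)]).foldl (fun (p : Int × Int) (iv : Int × (Int × Int)) => if ((6:Int)).toNat.testBit iv.1.toNat then (p.1 + iv.2.1, p.2 + iv.2.2) else p) ((0:Int), (0:Int)) = (9,8) := by decide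
  have E7 : (PySem.List.enumerate [((3:Int),(6:Int)),(4,3),(5,5)]).foldl (fun (p : Int × Int) (iv : Int × (Int × Int)) => if ((7:Int)).toNat.testBit iv.1.toNat then (p.1 + iv.2.1, p.2 + iv.2.2) else p) ((0:Int), (0:Int)) = (12,14) := by decide
  unfold solution_alt gAlt
  simp only [List.length, h8, List.foldl, E0, E1, E2, E3, E4, E5, E6, E7]
  split_ifs <;> omega

def f0 (j : Int) : Int := if 3 ≤ j then 6 else 0
def f1 (j : Int) : Int := if 7 ≤ j then 9 else if 4 ≤ j then 6 else 0
def f2 (j : Int) : Int := if 12 ≤ j then 14 else if 9 ≤ j then 11 else if 7 ≤ j then 9 else if 5 ≤ j then 6 else 0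

def rowL (n : Int) (f : Int → Int) (k : Int) : List Int :=
  (List.range (n + 2).toNat).map (fun (j : Nat) => if (j : Int) < k then f (j : Int) else 0)

def zRow (n : Int) : List Int := rowL n (fun _ => 0) 0

theorem length_rowL (n : Int) (f : Int → Int) (k : Int) : (rowL n f k).length = (n+2).toNat := by
  simp [rowL]

theorem setA (l : List Int) (t : Nat) (v : Int) :
    l.toArray.setIfInBounds t v = (l.set t v).toArray := by simp

theorem pvGet_rowA (n : Int) (f : Int → Int) (k t : Int) (h0 : 0 ≤ t) (h1 : t < n + 2) :
    pvGet (rowL n f k).toArray t = if t < k then f t else 0 := by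
  have ht : t.toNat < (n+2).toNat := by omega
  rw [pvGet, if_neg (by omega), List.getElem?_toArray, rowL, List.getElem?_map,
      List.getElem?_range ht]
  simp [Int.toNat_of_nonneg h0]

theorem pvGet_zRow (n t : Int) (h0 : 0 ≤ t) (h1 : t < n + 2) : pvGet (zRow n).toArray t = 0 := by
  simp [zRow, pvGet_rowA n _ 0 t h0 h1]

theorem rowL_zero (n : Int) (f : Int → Int) : rowL n f 0 = zRow n := by
  simp only [rowL, zRow]
  apply List.map_congr_left
  intro a _
  simp

theorem rowL_set (n : Int) (f : Int → Int) (k : Int) (h0 : 0 ≤ k) (h1 : k < n + 2) :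
    (rowL n f k).set k.toNat (f k) = rowL n f (k + 1) := by
  apply List.ext_getElem
  · simp [rowL]
  · intro j hj _
    simp only [rowL, List.getElem_set, List.getElem_map, List.getElem_range] at *
    simp only [List.length_set, List.length_map, List.length_range] at hj
    by_cases h : k.toNat = j
    · subst h
      simp [Int.toNat_of_nonneg h0]
    · rw [if_neg h]
      have hjk : (j:Int) ≠ k := by omega
      by_cases hc : (j:Int) < k
      · rw [if_pos hc, if_pos (by omega)]
      · rw [if_neg hc, if_neg (by omega)]

theorem rowL_succ_zero (n : Int) (f : Int → Int) (k : Int) (h0 : 0 ≤ k) (h1 : k < n + 2)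
    (hf : f k = 0) : rowL n f (k + 1) = rowL n f k := by
  rw [← rowL_set n f k h0 h1, hf]
  apply List.ext_getElem
  · simp
  · intro j hj _
    simp only [List.getElem_set, rowL, List.getElem_map, List.getElem_range] at *
    by_cases h : k.toNat = j
    · subst h; rw [if_pos rfl]
      have : ¬ ((k.toNat : Int) < k) := by omega
      rw [if_neg this]
    · rw [if_neg h]

theorem pvGet_set_self (xs : List Int) (t : Int) (v : Int) (h0 : 0 ≤ t) (h1 : t.toNat < xs.length) :
    pvGet ((xs.set t.toNat v).toArray) t = v := by
  rw [pvGet, if_neg (by omega), List.getElem?_toArray]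
  simp [List.getElem?_set_self, h1]

-- step lemmas
theorem pvGetRow_neg1 (a b c e : Array Int) : pvGetRow [a,b,c,e] (0 - 1) = e := by
  norm_num [pvGetRow, PySem.List.pyGet?, PySem.List.pyIdx?]

theorem pvGetRow_0 (a b c e : Array Int) : pvGetRow [a,b,c,e] 0 = a := by
  simp [pvGetRow, PySem.List.pyGet?, PySem.List.pyIdx?]

theorem pvGetRow_1 (a b c e : Array Int) : pvGetRow [a,b,c,e] 1 = b := by
  simp [pvGetRow, PySem.List.pyGet?, PySem.List.pyIdx?]

theorem pvGetRow_2 (a b c e : Array Int) : pvGetRow [a,b,c,e] 2 = c := by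
  simp [pvGetRow, PySem.List.pyGet?, PySem.List.pyIdx?]

theorem pvSet_0 (a b c e : Array Int) (j x : Int) :
    pvSet [a,b,c,e] 0 j x = [a.setIfInBounds j.toNat x, b, c, e] := by
  simp [pvSet, pvGetRow_0, List.set]

theorem pvSet_1 (a b c e : Array Int) (j x : Int) :
    pvSet [a,b,c,e] 1 j x = [a, b.setIfInBounds j.toNat x, c, e] := by
  simp [pvSet, pvGetRow_1, List.set]

theorem pvSet_2 (a b c e : Array Int) (j x : Int) :
    pvSet [a,b,c,e] 2 j x = [a, b, c.setIfInBounds j.toNat x, e] := by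
  simp [pvSet, pvGetRow_2, List.set]

theorem step0 (n k : Int) (h0 : 0 ≤ k) (h1 : k ≤ n) :
    bodyA [3,4,5] [6,3,5] 0 [(rowL n f0 k).toArray, (zRow n).toArray, (zRow n).toArray, (zRow n).toArray] k
      = [(rowL n f0 (k+1)).toArray, (zRow n).toArray, (zRow n).toArray, (zRow n).toArray] := by
  have hs : pvGetL [3,4,5] (0:Int) = 3 := by decide
  have hv : pvGetL [6,3,5] (0:Int) = 6 := by decide
  unfold bodyA
  rw [hs, hv]
  by_cases hc : (3:Int) ≤ k
  · rw [if_pos hc]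
    simp only [pvGetRow_neg1, pvGet_zRow n k h0 (by omega), pvSet_0, setA,
      pvGet_zRow n (k-3) (by omega) (by omega), pvGetRow_0,
      pvGet_set_self (rowL n f0 k) k 0 h0 (by rw [length_rowL]; omega), List.set_set]
    have : max (6 + 0 : Int) 0 = f0 k := by unfold f0; rw [if_pos hc]; omega
    rw [this, rowL_set n f0 k h0 (by omega)]
  · rw [if_neg hc, rowL_succ_zero n f0 k h0 (by omega) (by unfold f0; rw [if_neg hc])]

theorem step1 (n k : Int) (h0 : 0 ≤ k) (h1 : k ≤ n) :
    bodyA [3,4,5] [6,3,5] 1 [(rowL n f0 (n+1)).toArray, (rowL n f1 k).toArray, (zRow n).toArray, (zRow n).toArray] k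
      = [(rowL n f0 (n+1)).toArray, (rowL n f1 (k+1)).toArray, (zRow n).toArray, (zRow n).toArray] := by
  have hs : pvGetL [3,4,5] (1:Int) = 4 := by decide
  have hv : pvGetL [6,3,5] (1:Int) = 3 := by decide
  have hprev : pvGetRow [(rowL n f0 (n+1)).toArray, (rowL n f1 k).toArray, (zRow n).toArray, (zRow n).toArray] (1 - 1)
      = (rowL n f0 (n+1)).toArray := by norm_num [pvGetRow_0]
  unfold bodyA
  rw [hs, hv]
  by_cases hc : (4:Int) ≤ k
  · have hprev2 : ∀ x : Array Int, pvGetRow [(rowL n f0 (n+1)).toArray, x, (zRow n).toArray, (zRow n).toArray] (1 - 1)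
        = (rowL n f0 (n+1)).toArray := fun x => by norm_num [pvGetRow_0]
    rw [if_pos hc]
    simp only [hprev, pvGet_rowA n f0 (n+1) k h0 (by omega), pvSet_1, setA, hprev2,
      pvGet_rowA n f0 (n+1) (k-4) (by omega) (by omega), pvGetRow_1,
      pvGet_set_self (rowL n f1 k) k _ h0 (by rw [length_rowL]; omega),
      List.set_set, if_pos (show k < n + 1 from by omega), if_pos (show k - 4 < n + 1 from by omega)]
    have : max (3 + f0 (k-4)) (f0 k) = f1 k := by
      unfold f0 f1; split_ifs <;> omega
    rw [this, rowL_set n f1 k h0 (by omega)]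
  · rw [if_neg hc, rowL_succ_zero n f1 k h0 (by omega)
        (by unfold f1; rw [if_neg (by omega), if_neg (by omega)])]

theorem step2 (n k : Int) (h0 : 0 ≤ k) (h1 : k ≤ n) :
    bodyA [3,4,5] [6,3,5] 2 [(rowL n f0 (n+1)).toArray, (rowL n f1 (n+1)).toArray, (rowL n f2 k).toArray, (zRow n).toArray] k
      = [(rowL n f0 (n+1)).toArray, (rowL n f1 (n+1)).toArray, (rowL n f2 (k+1)).toArray, (zRow n).toArray] := by
  have hs : pvGetL [3,4,5] (2:Int) = 5 := by decide
  have hv : pvGetL [6,3,5] (2:Int) = 5 := by decide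
  have hprev : pvGetRow [(rowL n f0 (n+1)).toArray, (rowL n f1 (n+1)).toArray, (rowL n f2 k).toArray, (zRow n).toArray] (2 - 1)
      = (rowL n f1 (n+1)).toArray := by norm_num [pvGetRow_1]
  unfold bodyA
  rw [hs, hv]
  by_cases hc : (5:Int) ≤ k
  · have hprev2 : ∀ x : Array Int, pvGetRow [(rowL n f0 (n+1)).toArray, (rowL n f1 (n+1)).toArray, x, (zRow n).toArray] (2 - 1)
        = (rowL n f1 (n+1)).toArray := fun x => by norm_num [pvGetRow_1]
    rw [if_pos hc]
    simp only [hprev, pvGet_rowA n f1 (n+1) k h0 (by omega), pvSet_2, setA, hprev2,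
      pvGet_rowA n f1 (n+1) (k-5) (by omega) (by omega), pvGetRow_2,
      pvGet_set_self (rowL n f2 k) k _ h0 (by rw [length_rowL]; omega),
      List.set_set, if_pos (show k < n + 1 from by omega), if_pos (show k - 5 < n + 1 from by omega)]
    have : max (5 + f1 (k-5)) (f1 k) = f2 k := by
      unfold f1 f2; split_ifs <;> omega
    rw [this, rowL_set n f2 k h0 (by omega)]
  · rw [if_neg hc, rowL_succ_zero n f2 k h0 (by omega)
        (by unfold f2; norm_num; omega)]

-- iteration lemmas
theorem iter0 (n : Int) (hn : 0 ≤ n) : ∀ k : Nat, (k : Int) ≤ n + 1 →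
    (PySem.List.pyRange 0 (k : Int) 1).foldl (bodyA [3,4,5] [6,3,5] 0)
      [(zRow n).toArray, (zRow n).toArray, (zRow n).toArray, (zRow n).toArray]
      = [(rowL n f0 (k : Int)).toArray, (zRow n).toArray, (zRow n).toArray, (zRow n).toArray] := by
  intro k
  induction k with
  | zero => intro _; simp [rowL_zero]
  | succ m ih =>
      intro h
      rw [show ((m+1 : Nat) : Int) = (m:Int) + 1 by push_cast; ring,
          PySem.List.pyRange_one_succ_right (by positivity),
          List.foldl_append, ih (by push_cast at h ⊢; omega)]
      simp only [List.foldl]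
      rw [step0 n m (by positivity) (by push_cast at h; omega)]

theorem iter1 (n : Int) (hn : 0 ≤ n) : ∀ k : Nat, (k : Int) ≤ n + 1 →
    (PySem.List.pyRange 0 (k : Int) 1).foldl (bodyA [3,4,5] [6,3,5] 1)
      [(rowL n f0 (n+1)).toArray, (zRow n).toArray, (zRow n).toArray, (zRow n).toArray]
      = [(rowL n f0 (n+1)).toArray, (rowL n f1 (k : Int)).toArray, (zRow n).toArray, (zRow n).toArray] := by
  intro k
  induction k with
  | zero => intro _; simp [rowL_zero]
  | succ m ih =>
      intro h
      rw [show ((m+1 : Nat) : Int) = (m:Int) + 1 by push_cast; ring,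
          PySem.List.pyRange_one_succ_right (by positivity),
          List.foldl_append, ih (by push_cast at h ⊢; omega)]
      simp only [List.foldl]
      rw [step1 n m (by positivity) (by push_cast at h; omega)]

theorem iter2 (n : Int) (hn : 0 ≤ n) : ∀ k : Nat, (k : Int) ≤ n + 1 →
    (PySem.List.pyRange 0 (k : Int) 1).foldl (bodyA [3,4,5] [6,3,5] 2)
      [(rowL n f0 (n+1)).toArray, (rowL n f1 (n+1)).toArray, (zRow n).toArray, (zRow n).toArray]
      = [(rowL n f0 (n+1)).toArray, (rowL n f1 (n+1)).toArray, (rowL n f2 (k : Int)).toArray, (zRow n).toArray] := by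
  intro k
  induction k with
  | zero => intro _; simp [rowL_zero]
  | succ m ih =>
      intro h
      rw [show ((m+1 : Nat) : Int) = (m:Int) + 1 by push_cast; ring,
          PySem.List.pyRange_one_succ_right (by positivity),
          List.foldl_append, ih (by push_cast at h ⊢; omega)]
      simp only [List.foldl]
      rw [step2 n m (by positivity) (by push_cast at h; omega)]

theorem sol_closed (n : Int) (hn : 0 ≤ n) : solution n = f2 n := by
  have hzr : ((PySem.List.pyRange 0 (n + 2) 1).map (fun _ => (0:Int))).toArray = (zRow n).toArray := by
    congr 1
    simp [zRow, rowL, PySem.List.pyRange_one, List.map_map, Function.comp_def,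
      List.map_const']
  have hr3 : PySem.List.pyRange 0 ((([3,4,5] : List Int).length : Int)) 1 = [0,1,2] := by decide
  have hr4 : PySem.List.pyRange 0 ((([3,4,5] : List Int).length : Int) + 1) 1 = [0,1,2,3] := by decide
  have hn1 : n + 1 = (((n+1).toNat : Nat) : Int) := by omega
  simp only [solution]
  rw [hr3, hr4]
  simp only [List.map, List.foldl, hzr]
  rw [hn1, iter0 n hn _ (by omega)]
  rw [show rowL n f0 (((n+1).toNat : Nat) : Int) = rowL n f0 (n+1) from by rw [← hn1]]
  rw [iter1 n hn _ (by omega)]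
  rw [show rowL n f1 (((n+1).toNat : Nat) : Int) = rowL n f1 (n+1) from by rw [← hn1]]
  rw [iter2 n hn _ (by omega)]
  rw [show rowL n f2 (((n+1).toNat : Nat) : Int) = rowL n f2 (n+1) from by rw [← hn1]]
  norm_num [pvGetRow_2]
  rw [pvGet_rowA n f2 (n+1) n hn (by omega), if_pos (by omega)]

-- ===== VERDICT (by name: the statement is the Claim_ definition above) =====
theorem solution_spec : Claim_unchanged_solution := by
  intro n _ hpre hD
  rcases Int.lt_or_le n 0 with h | h
  · have : n = -1 := by unfold Pre_solution at hpre; omega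
    subst this; decide
  · rw [sol_closed n h, alt_closed n]
    unfold D_solution at hD
    unfold f2 gAlt
    split_ifs <;> omega

theorem solution_changed : Claim_changed_solution := by
  unfold Claim_changed_solution; decide

theorem solution_tight : Claim_exact_solution := by
  intro n _ _ hD
  unfold D_solution at hD
  rcases hD with h | h | h <;> subst h <;> decide
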